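-- pv_equiv track=rewrite | github.com/BjornMelin/ai-docs-vector-db-hybrid-scraper | scripts/advanced_quality_fixes.py | _infer_exception_type
-- ===== SOURCE A (Python) =====
-- def _infer_exception_type(context: str) -> str:
--     """Infer appropriate exception type from context."""
--     # Common patterns for exception inference
--     if any(word in context.lower() for word in ['file', 'open', 'read', 'write']):
--         return "OSError"
--     elif any(word in context.lower() for word in ['json', 'parse', 'decode']):
--         return "(ValueError, TypeError)"
--     elif any(word in context.lower() for word in ['http', 'request', 'api', 'client']):
--         return "Exception"  # Often custom exceptions
--     elif any(word in context.lower() for word in ['import', 'module']):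
--         return "ImportError"
--     elif any(word in context.lower() for word in ['key', 'index', 'dict', 'list']):
--         return "(KeyError, IndexError)"
--     else:
--         return "Exception"  # Safe fallback
-- ===== SOURCE B (Python) =====
-- # Flat keyword -> (priority, exception) map scanned EXHAUSTIVELY with a running
-- # min-by-priority accumulator (no early return; the scan order is irrelevant,
-- # here lowest-priority entries first).
-- KEYWORD_RULES = {
--     "key": (4, "(KeyError, IndexError)"),
--     "index": (4, "(KeyError, IndexError)"),
--     "dict": (4, "(KeyError, IndexError)"),
--     "list": (4, "(KeyError, IndexError)"),
--     "import": (3, "ImportError"),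
--     "module": (3, "ImportError"),
--     "http": (2, "Exception"),
--     "request": (2, "Exception"),
--     "api": (2, "Exception"),
--     "client": (2, "Exception"),
--     "json": (1, "(ValueError, TypeError)"),
--     "parse": (1, "(ValueError, TypeError)"),
--     "decode": (1, "(ValueError, TypeError)"),
--     "file": (0, "OSError"),
--     "open": (0, "OSError"),
--     "read": (0, "OSError"),
--     "write": (0, "OSError"),
-- }
--
--
-- def _infer_exception_type(context: str) -> str:
--     """Infer appropriate exception type from context."""
--     lc = context.lower()
--     best = None
--     for kw, rule in KEYWORD_RULES.items():
--         if kw in lc and (best is None or rule[0] < best[0]):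
--             best = rule
--     return best[1] if best is not None else "Exception"
-- ===== Notes on version B (the rewrite author's own statement) =====
-- stated objective: alternative
-- what changed: Replaces the short-circuit if/elif chain over keyword groups (recomputing context.lower() in every branch) by an exhaustive min-by-priority scan with an accumulator over a flat keyword->(priority, exception) map, lowercasing once; correct because the smallest matched priority is exactly A's first matching branch.
import Mathlib
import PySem

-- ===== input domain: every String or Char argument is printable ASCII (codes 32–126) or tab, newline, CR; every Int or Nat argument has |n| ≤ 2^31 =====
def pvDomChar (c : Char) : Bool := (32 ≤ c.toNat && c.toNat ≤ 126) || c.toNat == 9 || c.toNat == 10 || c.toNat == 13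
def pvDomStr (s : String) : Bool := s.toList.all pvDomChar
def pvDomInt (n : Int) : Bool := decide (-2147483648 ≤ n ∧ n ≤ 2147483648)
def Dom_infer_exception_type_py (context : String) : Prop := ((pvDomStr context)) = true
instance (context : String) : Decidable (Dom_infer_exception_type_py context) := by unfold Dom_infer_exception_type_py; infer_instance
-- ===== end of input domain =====

-- B replaces A's short-circuit if/elif chain by an exhaustive min-by-priority scan
-- over a flat keyword -> (priority, exception) map, lowercasing once (alternative).
-- ===== PORT A =====
def infer_exception_type_py (context : String) : String :=
  if ["file", "open", "read", "write"].any (fun word => PySem.Str.isIn word (PySem.Str.lower context)) then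
    "OSError"
  else if ["json", "parse", "decode"].any (fun word => PySem.Str.isIn word (PySem.Str.lower context)) then
    "(ValueError, TypeError)"
  else if ["http", "request", "api", "client"].any (fun word => PySem.Str.isIn word (PySem.Str.lower context)) then
    "Exception"
  else if ["import", "module"].any (fun word => PySem.Str.isIn word (PySem.Str.lower context)) then
    "ImportError"
  else if ["key", "index", "dict", "list"].any (fun word => PySem.Str.isIn word (PySem.Str.lower context)) then
    "(KeyError, IndexError)"
  else
    "Exception"

-- ===== PORT B =====
-- the KEYWORD_RULES dict of Source B, in its insertion order
def pvRules : List (String × Int × String) :=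
  [ ("key", 4, "(KeyError, IndexError)"), ("index", 4, "(KeyError, IndexError)"),
    ("dict", 4, "(KeyError, IndexError)"), ("list", 4, "(KeyError, IndexError)"),
    ("import", 3, "ImportError"), ("module", 3, "ImportError"),
    ("http", 2, "Exception"), ("request", 2, "Exception"),
    ("api", 2, "Exception"), ("client", 2, "Exception"),
    ("json", 1, "(ValueError, TypeError)"), ("parse", 1, "(ValueError, TypeError)"),
    ("decode", 1, "(ValueError, TypeError)"),
    ("file", 0, "OSError"), ("open", 0, "OSError"),
    ("read", 0, "OSError"), ("write", 0, "OSError") ]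

-- the loop body: 'if kw in lc and (best is None or rule[0] < best[0]): best = rule'
def pvStep (lc : String) (best : Option (Int × String)) (it : String × Int × String) :
    Option (Int × String) :=
  if PySem.Str.isIn it.1 lc &&
      (match best with | none => true | some br => decide (it.2.1 < br.1)) then
    some it.2
  else best

def infer_exception_type_py_alt (context : String) : String :=
  match pvRules.foldl (pvStep (PySem.Str.lower context)) none with
  | some br => br.2
  | none => "Exception"

-- ===== PRECONDITION & SPEC =====
def Spec_infer_exception_type_py (context : String) (out : String) : Prop := out = infer_exception_type_py_alt context
instance (context : String) (out : String) : Decidable (Spec_infer_exception_type_py context out) := by unfold Spec_infer_exception_type_py; infer_instance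

-- ===== CLAIM (what is proved, stated in full; the proofs are below) =====
def Claim_equal_infer_exception_type_py : Prop := ∀ (context : String), Dom_infer_exception_type_py context → Spec_infer_exception_type_py context (infer_exception_type_py context)

-- ===== LEMMAS AND PROOFS =====

-- items whose rank is not below r never replace a best of rank r
theorem pv_noImprove (lc : String) (r : Int) (e : String)
    (L : List (String × Int × String)) (h : ∀ it ∈ L, ¬ it.2.1 < r) :
    L.foldl (pvStep lc) (some (r, e)) = some (r, e) := by
  induction L with
  | nil => rfl
  | cons a t ih =>
      have ha : ¬ a.2.1 < r := h a (List.mem_cons_self)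
      have : pvStep lc (some (r, e)) a = some (r, e) := by
        simp [pvStep, ha]
      rw [List.foldl_cons, this]
      exact ih (fun it hit => h it (List.mem_cons_of_mem _ hit))

-- a block of keywords sharing one rank/exception, starting from a strictly worse best
theorem pv_block (lc : String) (r : Int) (e : String) (kws : List String)
    (acc : Option (Int × String)) (hacc : ∀ p, acc = some p → r < p.1) :
    (kws.map (fun kw => (kw, r, e))).foldl (pvStep lc) acc
      = if kws.any (fun kw => PySem.Str.isIn kw lc) then some (r, e) else acc := by
  induction kws generalizing acc with
  | nil => simp
  | cons kw t ih =>
      by_cases hk : PySem.Str.isIn kw lc = true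
      · have hkc := hk
        simp only [PySem.Str.isIn_eq] at hkc
        have hstep : pvStep lc acc (kw, r, e) = some (r, e) := by
          cases acc with
          | none => simp [pvStep, hkc]
          | some p =>
              have := hacc p rfl
              simp [pvStep, hkc, this]
        have hrest : (t.map (fun kw => (kw, r, e))).foldl (pvStep lc) (some (r, e))
            = some (r, e) := by
          apply pv_noImprove
          intro it hit
          rcases List.mem_map.mp hit with ⟨x, _, rfl⟩
          simp
        simp [List.map_cons, List.foldl_cons, hstep, hrest, hkc]
      · have hk' : PySem.Str.isIn kw lc = false := by
          cases h : PySem.Str.isIn kw lc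
          · rfl
          · exact absurd h hk
        simp only [PySem.Str.isIn_eq] at hk'
        have hstep : pvStep lc acc (kw, r, e) = acc := by
          simp [pvStep, hk']
        simp [List.map_cons, List.foldl_cons, hstep, ih acc hacc, hk']

-- the rules list is five constant-rank blocks, lowest priority first
theorem pv_split : pvRules =
    (["key", "index", "dict", "list"].map (fun kw => (kw, (4 : Int), "(KeyError, IndexError)")))
    ++ (["import", "module"].map (fun kw => (kw, (3 : Int), "ImportError")))
    ++ (["http", "request", "api", "client"].map (fun kw => (kw, (2 : Int), "Exception")))
    ++ (["json", "parse", "decode"].map (fun kw => (kw, (1 : Int), "(ValueError, TypeError)")))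
    ++ (["file", "open", "read", "write"].map (fun kw => (kw, (0 : Int), "OSError"))) := rfl

-- ===== VERDICT (by name: the statement is the Claim_ definition above) =====
theorem infer_exception_type_py_spec : Claim_equal_infer_exception_type_py := by
  intro context _
  show infer_exception_type_py context = infer_exception_type_py_alt context
  rw [infer_exception_type_py_alt, pv_split]
  rw [List.foldl_append, List.foldl_append, List.foldl_append, List.foldl_append]
  rw [pv_block _ 4 _ _ none (by intro p hp; simp at hp)]
  rw [pv_block _ 3 _ _ _ (by intro p hp; split_ifs at hp <;> first | (cases hp; norm_num) | exact absurd hp (by simp))]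
  rw [pv_block _ 2 _ _ _ (by intro p hp; split_ifs at hp <;> first | (cases hp; norm_num) | exact absurd hp (by simp))]
  rw [pv_block _ 1 _ _ _ (by intro p hp; split_ifs at hp <;> first | (cases hp; norm_num) | exact absurd hp (by simp))]
  rw [pv_block _ 0 _ _ _ (by intro p hp; split_ifs at hp <;> first | (cases hp; norm_num) | exact absurd hp (by simp))]
  rw [infer_exception_type_py]
  split_ifs <;> rfl
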